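-- pv_equiv track=rewrite | github.com/ldct/cp | atcoder/arc113/A/A.py | ans3
-- ===== SOURCE A (Python) =====
-- def cdiv(x, y):
--     return x // y if x % y == 0 else x // y + 1
--
-- def ans3(K):
--     ret = 0
--     for a in range(1, K+1):
--         for b in range(1, cdiv(K, a)+1):
--             for c in range(1, cdiv(K, a*b)+1):
--                 if a*b*c <= K:
--                     ret += 1
--     return ret
-- ===== SOURCE B (Python) =====
-- def ans3(K):
--     ret = 0
--     for a in range(1, K+1):
--         for b in range(1, K//a + 1):
--             ret += K // (a*b)
--     return ret
-- ===== Notes on version B (the rewrite author's own statement) =====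
-- stated objective: faster
-- what changed: B drops the innermost c-loop entirely, adding the closed-form count K//(a*b) per (a,b) pair, and iterates b only up to K//a instead of ceil(K/a).
import Mathlib
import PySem

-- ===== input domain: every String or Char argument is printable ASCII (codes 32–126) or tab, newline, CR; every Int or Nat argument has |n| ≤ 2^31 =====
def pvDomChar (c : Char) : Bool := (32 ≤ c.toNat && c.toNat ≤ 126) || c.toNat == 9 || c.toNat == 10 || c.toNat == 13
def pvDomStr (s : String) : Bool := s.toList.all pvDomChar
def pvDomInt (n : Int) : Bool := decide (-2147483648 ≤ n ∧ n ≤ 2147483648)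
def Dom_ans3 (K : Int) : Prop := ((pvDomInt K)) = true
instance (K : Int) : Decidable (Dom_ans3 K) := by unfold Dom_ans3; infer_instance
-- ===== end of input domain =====

-- B replaces A's innermost loop by the closed-form count K//(a*b) and shortens the b-range; proved equal for all K.

-- ===== PORT A =====
def cdiv (x y : Int) : Int :=
  if PySem.Int.mod x y = 0 then PySem.Int.floordiv x y else PySem.Int.floordiv x y + 1

def ans3 (K : Int) : Int :=
  (PySem.List.pyRange 1 (K+1) 1).foldl (fun ret a =>
    (PySem.List.pyRange 1 (cdiv K a + 1) 1).foldl (fun ret b =>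
      (PySem.List.pyRange 1 (cdiv K (a*b) + 1) 1).foldl (fun ret c =>
        if a*b*c ≤ K then ret + 1 else ret) ret) ret) 0

-- ===== PORT B =====
def ans3_alt (K : Int) : Int :=
  (PySem.List.pyRange 1 (K+1) 1).foldl (fun ret a =>
    (PySem.List.pyRange 1 (PySem.Int.floordiv K a + 1) 1).foldl (fun ret b =>
      ret + PySem.Int.floordiv K (a*b)) ret) 0

-- ===== PRECONDITION & SPEC =====
def Spec_ans3 (K : Int) (out : Int) : Prop := out = ans3_alt K
instance (K : Int) (out : Int) : Decidable (Spec_ans3 K out) := by unfold Spec_ans3; infer_instance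

-- ===== CLAIM (what is proved, stated in full; the proofs are below) =====
def Claim_equal_ans3 : Prop := ∀ (K : Int), Dom_ans3 K → Spec_ans3 K (ans3 K)

-- ===== LEMMAS AND PROOFS =====

theorem pv_sum_map_ones (l : List Int) (f : Int → Int) (h : ∀ x ∈ l, f x = 1) :
    (l.map f).sum = (l.length : Int) := by
  induction l with
  | nil => simp
  | cons x xs ih =>
    simp only [List.map_cons, List.sum_cons, List.length_cons, h x (by simp)]
    rw [ih (fun y hy => h y (List.mem_cons_of_mem _ hy))]
    push_cast; ring

theorem pv_sum_map_zeros (l : List Int) (f : Int → Int) (h : ∀ x ∈ l, f x = 0) :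
    (l.map f).sum = 0 := by
  induction l with
  | nil => simp
  | cons x xs ih =>
    simp only [List.map_cons, List.sum_cons, h x (by simp)]
    rw [ih (fun y hy => h y (List.mem_cons_of_mem _ hy))]
    ring

-- A's innermost loop counts exactly ⌊K/m⌋ values of c (m = a*b > 0, K ≥ 0).
theorem pv_inner_count (K m r : Int) (hm : 0 < m) (hK : 0 ≤ K) :
    (PySem.List.pyRange 1 (cdiv K m + 1) 1).foldl
      (fun ret c => if m * c ≤ K then ret + 1 else ret) r
    = r + PySem.Int.floordiv K m := by
  set q := PySem.Int.floordiv K m with hq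
  have hq0 : 0 ≤ q := by
    rw [hq, PySem.Int.floordiv_eq_ediv_of_pos hm]
    exact Int.ediv_nonneg hK hm.le
  have hcd : cdiv K m = q ∨ cdiv K m = q + 1 := by
    unfold cdiv; split_ifs <;> [exact Or.inl rfl; exact Or.inr rfl]
  have hqm : q * m ≤ K := (PySem.Int.le_floordiv_iff_mul_le hm).mp (le_of_eq hq)
  have hKlt : K < (q + 1) * m := (PySem.Int.floordiv_lt_iff_lt_mul hm).mp (by omega)
  have hfun : (fun (ret c : Int) => if m * c ≤ K then ret + 1 else ret)
      = fun ret c => ret + (if m * c ≤ K then (1:Int) else 0) := by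
    funext ret c; split <;> simp
  rw [hfun, PySem.List.pyRange_one_append 1 (q+1) (cdiv K m + 1) (by omega) (by omega),
    List.foldl_append, PySem.List.foldl_add, PySem.List.foldl_add]
  have hS1 : ((PySem.List.pyRange 1 (q+1) 1).map
      (fun c => if m * c ≤ K then (1:Int) else 0)).sum = q := by
    rw [pv_sum_map_ones]
    · rw [PySem.List.length_pyRange_one]; omega
    · intro c hc
      have hc' := PySem.List.mem_pyRange_one.mp hc
      have : m * c ≤ m * q := by
        apply mul_le_mul_of_nonneg_left (by omega) hm.le
      simp only [if_pos (by nlinarith : m * c ≤ K)]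
  have hS2 : ((PySem.List.pyRange (q+1) (cdiv K m + 1) 1).map
      (fun c => if m * c ≤ K then (1:Int) else 0)).sum = 0 := by
    apply pv_sum_map_zeros
    intro c hc
    have hc' := PySem.List.mem_pyRange_one.mp hc
    have : (q + 1) * m ≤ m * c := by
      rw [mul_comm (q+1) m]
      exact mul_le_mul_of_nonneg_left (by omega) hm.le
    simp only [if_neg (by omega : ¬ m * c ≤ K)]
  rw [hS1, hS2]; ring

-- The extra b's of A's middle loop (between K//a and ceil(K/a)) contribute 0.
theorem pv_mid_eq (K a r : Int) (ha : 0 < a) (hK : 0 ≤ K) :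
    (PySem.List.pyRange 1 (cdiv K a + 1) 1).foldl
      (fun ret b => ret + PySem.Int.floordiv K (a * b)) r
    = (PySem.List.pyRange 1 (PySem.Int.floordiv K a + 1) 1).foldl
      (fun ret b => ret + PySem.Int.floordiv K (a * b)) r := by
  set q := PySem.Int.floordiv K a with hq
  have hq0 : 0 ≤ q := by
    rw [hq, PySem.Int.floordiv_eq_ediv_of_pos ha]
    exact Int.ediv_nonneg hK ha.le
  have hcd : cdiv K a = q ∨ cdiv K a = q + 1 := by
    unfold cdiv; split_ifs <;> [exact Or.inl rfl; exact Or.inr rfl]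
  have hKlt : K < (q + 1) * a := (PySem.Int.floordiv_lt_iff_lt_mul ha).mp (by omega)
  rw [PySem.List.pyRange_one_append 1 (q+1) (cdiv K a + 1) (by omega) (by omega),
    List.foldl_append, PySem.List.foldl_add, PySem.List.foldl_add]
  have hS2 : ((PySem.List.pyRange (q+1) (cdiv K a + 1) 1).map
      (fun b => PySem.Int.floordiv K (a * b))).sum = 0 := by
    apply pv_sum_map_zeros
    intro b hb
    have hb' := PySem.List.mem_pyRange_one.mp hb
    have hab : K < a * b := by
      have : (q + 1) * a ≤ a * b := by
        rw [mul_comm (q+1) a]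
        exact mul_le_mul_of_nonneg_left (by omega) ha.le
      omega
    rw [PySem.Int.floordiv_eq_ediv_of_pos (by omega)]
    exact Int.ediv_eq_zero_of_lt hK hab
  rw [hS2]; ring

-- ===== VERDICT (by name: the statement is the Claim_ definition above) =====
theorem ans3_spec : Claim_equal_ans3 := by
  intro K _
  unfold Spec_ans3 ans3 ans3_alt
  apply PySem.List.foldl_congr_mem
  intro ret a ha
  have ha' := PySem.List.mem_pyRange_one.mp ha
  have hK : 0 ≤ K := by omega
  have haK : 0 < a := by omega
  have h1 : (PySem.List.pyRange 1 (cdiv K a + 1) 1).foldl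
      (fun ret b =>
        (PySem.List.pyRange 1 (cdiv K (a*b) + 1) 1).foldl (fun ret c =>
          if a*b*c ≤ K then ret + 1 else ret) ret) ret
    = (PySem.List.pyRange 1 (cdiv K a + 1) 1).foldl
      (fun ret b => ret + PySem.Int.floordiv K (a * b)) ret := by
    apply PySem.List.foldl_congr_mem
    intro r b hb
    have hb' := PySem.List.mem_pyRange_one.mp hb
    exact pv_inner_count K (a*b) r (mul_pos haK (by omega)) hK
  rw [h1, pv_mid_eq K a ret haK hK]
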